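-- pv_equiv track=rewrite | github.com/zappybiby/EkoHeartRate | main.py | group_outlier_columns
-- ===== SOURCE A (Python) =====
-- def group_outlier_columns(outlier_columns, gap_threshold):
--     """Groups outlier columns based on a specified gap threshold."""
--     grouped_outliers = []
--     current_group = [outlier_columns[0]]
--     for column in outlier_columns[1:]:
--         if column - current_group[-1] <= gap_threshold:
--             current_group.append(column)
--         else:
--             grouped_outliers.append(current_group)
--             current_group = [column]
--     grouped_outliers.append(current_group)
--     return grouped_outliers
-- ===== SOURCE B (Python) =====
-- def group_outlier_columns(outlier_columns, gap_threshold):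
--     """Groups outlier columns based on a specified gap threshold.
--
--     Two passes: first collect the break indices (where the gap between
--     neighbours exceeds the threshold), then cut the list into slices at
--     those boundaries."""
--     n = len(outlier_columns)
--     breaks = [i for i in range(1, n)
--               if outlier_columns[i] - outlier_columns[i - 1] > gap_threshold]
--     bounds = [0] + breaks + [n]
--     return [outlier_columns[a:b] for a, b in zip(bounds, bounds[1:])]
-- ===== Notes on version B (the rewrite author's own statement) =====
-- stated objective: alternative
-- what changed: B makes two passes -- it first collects the break indices where the neighbour gap exceeds the threshold, then cuts the input into slices at those boundaries -- instead of A's single pass that accumulates a pending current_group element by element and flushes it at each break.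
import Mathlib
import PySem

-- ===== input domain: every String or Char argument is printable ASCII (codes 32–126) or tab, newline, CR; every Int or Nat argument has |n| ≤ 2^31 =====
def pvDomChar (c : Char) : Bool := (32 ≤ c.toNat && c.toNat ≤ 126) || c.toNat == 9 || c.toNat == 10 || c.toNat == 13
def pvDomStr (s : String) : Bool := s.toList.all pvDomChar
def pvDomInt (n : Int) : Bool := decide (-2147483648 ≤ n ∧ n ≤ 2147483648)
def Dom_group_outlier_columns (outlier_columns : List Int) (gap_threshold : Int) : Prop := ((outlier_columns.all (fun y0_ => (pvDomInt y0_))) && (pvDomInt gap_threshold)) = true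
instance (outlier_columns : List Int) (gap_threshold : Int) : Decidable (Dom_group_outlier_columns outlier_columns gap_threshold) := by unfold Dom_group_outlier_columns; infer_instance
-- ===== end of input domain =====

-- B collects the break indices first and then cuts the list into slices at those boundaries,
-- instead of A's single pass accumulating a pending current_group (alternative decomposition).

-- ===== PORT A =====
-- the for-loop over outlier_columns[1:], state = (grouped_outliers, current_group)
def pvGoA (g : Int) : List Int → List Int → List (List Int) → List (List Int)
  | [], cur, acc => acc ++ [cur]
  | c :: rest, cur, acc =>
      if c - cur.getLast! ≤ g then pvGoA g rest (cur ++ [c]) acc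
      else pvGoA g rest [c] (acc ++ [cur])

def group_outlier_columns (outlier_columns : List Int) (gap_threshold : Int) : List (List Int) :=
  -- current_group = [outlier_columns[0]]; on [] Python raises IndexError (excluded by Pre_)
  pvGoA gap_threshold outlier_columns.tail [outlier_columns.head!] []

-- ===== PORT B =====
def group_outlier_columns_alt (outlier_columns : List Int) (gap_threshold : Int) : List (List Int) :=
  let n : Int := outlier_columns.length
  let breaks := (PySem.List.pyRange 1 n 1).filter
    (fun i => decide (PySem.List.pyGetD outlier_columns i 0 - PySem.List.pyGetD outlier_columns (i - 1) 0 > gap_threshold))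
  let bounds := 0 :: (breaks ++ [n])
  (bounds.zip bounds.tail).map (fun p => PySem.List.slice outlier_columns (some p.1) (some p.2))

-- ===== PRECONDITION & SPEC =====
-- A indexes outlier_columns[0] unconditionally, so it raises IndexError on the empty list.
def Pre_group_outlier_columns (outlier_columns : List Int) (gap_threshold : Int) : Prop :=
  outlier_columns ≠ []
instance (outlier_columns : List Int) (gap_threshold : Int) : Decidable (Pre_group_outlier_columns outlier_columns gap_threshold) := by unfold Pre_group_outlier_columns; infer_instance

def pvWitness_group_outlier_columns : List Int × Int := ([1, 2, 5, 6, 20], 2)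

def Spec_group_outlier_columns (outlier_columns : List Int) (gap_threshold : Int) (out : List (List Int)) : Prop := out = group_outlier_columns_alt outlier_columns gap_threshold
instance (outlier_columns : List Int) (gap_threshold : Int) (out : List (List Int)) : Decidable (Spec_group_outlier_columns outlier_columns gap_threshold out) := by unfold Spec_group_outlier_columns; infer_instance

-- ===== CLAIM (what is proved, stated in full; the proofs are below) =====
def Claim_equal_group_outlier_columns : Prop := ∀ (outlier_columns : List Int) (gap_threshold : Int), Dom_group_outlier_columns outlier_columns gap_threshold → Pre_group_outlier_columns outlier_columns gap_threshold → Spec_group_outlier_columns outlier_columns gap_threshold (group_outlier_columns outlier_columns gap_threshold)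

-- ===== LEMMAS AND PROOFS =====

-- the break condition of B, at an index i ≥ 1
def pvBrk (xs : List Int) (g : Int) (i : Int) : Bool :=
  decide (PySem.List.pyGetD xs i 0 - PySem.List.pyGetD xs (i - 1) 0 > g)

-- B's remaining break indices from i upward, and its slice-per-consecutive-pair map
def pvBrkFrom (xs : List Int) (g : Int) (i : Int) : List Int :=
  (PySem.List.pyRange i (xs.length : Int) 1).filter (pvBrk xs g)

def pvPairs (xs : List Int) (l : List Int) : List (List Int) :=
  (l.zip l.tail).map (fun p => PySem.List.slice xs (some p.1) (some p.2))

theorem pvPairs_cons_cons (xs : List Int) (a b : Int) (l : List Int) :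
    pvPairs xs (a :: b :: l) =
      PySem.List.slice xs (some a) (some b) :: pvPairs xs (b :: l) := by
  simp [pvPairs]

theorem pvSlice_natCast (xs : List Int) (s i : Nat) :
    PySem.List.slice xs (some (s : Int)) (some (i : Int)) = (xs.drop s).take (i - s) :=
  PySem.List.slice_natCast xs s i

theorem pvGetLast!_ne_nil (l : List Int) (h : l ≠ []) : l.getLast! = l.getLast h := by
  cases l with
  | nil => exact absurd rfl h
  | cons x t => simp [List.getLast!]

theorem pvSlice_getLast! (xs : List Int) (s i : Nat) (h1 : s < i) (h2 : i ≤ xs.length)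
    (hj : i - 1 < xs.length) :
    (PySem.List.slice xs (some (s : Int)) (some (i : Int))).getLast! = xs[i - 1]'hj := by
  rw [pvSlice_natCast]
  have hlen : ((xs.drop s).take (i - s)).length = i - s := by
    simp [List.length_take, List.length_drop]; omega
  have hne : (xs.drop s).take (i - s) ≠ [] := by
    intro h; rw [h] at hlen; simp at hlen; omega
  rw [pvGetLast!_ne_nil _ hne, List.getLast_eq_getElem]
  simp only [hlen]
  rw [List.getElem_take, List.getElem_drop]
  congr 1
  omega

theorem pvSlice_snoc (xs : List Int) (s i : Nat) (hs : s ≤ i) (hi : i < xs.length) :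
    PySem.List.slice xs (some (s : Int)) (some (i : Int)) ++ [xs[i]'hi] =
      PySem.List.slice xs (some (s : Int)) (some ((i + 1 : Nat) : Int)) := by
  rw [pvSlice_natCast, pvSlice_natCast]
  have h1 : i + 1 - s = (i - s) + 1 := by omega
  have h2 : i - s < (xs.drop s).length := by simp [List.length_drop]; omega
  rw [h1, List.take_add_one, List.getElem?_drop]
  have h3 : s + (i - s) = i := by omega
  simp [h3, List.getElem?_eq_getElem hi]

theorem pvSlice_single (xs : List Int) (i : Nat) (hi : i < xs.length) :
    PySem.List.slice xs (some (i : Int)) (some ((i + 1 : Nat) : Int)) = [xs[i]'hi] := by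
  rw [pvSlice_natCast]
  have h1 : i + 1 - i = 1 := by omega
  rw [h1, List.drop_eq_getElem_cons hi, List.take_succ_cons, List.take_zero]

theorem pvBrkFrom_nil (xs : List Int) (g : Int) : pvBrkFrom xs g (xs.length : Int) = [] := by
  unfold pvBrkFrom
  rw [PySem.List.pyRange_one_eq_nil (le_refl _)]
  rfl

theorem pvBrkFrom_cons (xs : List Int) (g : Int) (i : Nat) (hi : i < xs.length) :
    pvBrkFrom xs g (i : Int) =
      if pvBrk xs g i then (i : Int) :: pvBrkFrom xs g ((i + 1 : Nat) : Int)
      else pvBrkFrom xs g ((i + 1 : Nat) : Int) := by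
  unfold pvBrkFrom
  rw [PySem.List.pyRange_one_cons (by exact_mod_cast hi), List.filter_cons]
  push_cast
  split_ifs <;> rfl

theorem pvBrk_iff (xs : List Int) (g : Int) (i : Nat) (h1 : 1 ≤ i) (hi : i < xs.length)
    (hj : i - 1 < xs.length) :
    pvBrk xs g (i : Int) = true ↔ xs[i]'hi - xs[i - 1]'hj > g := by
  unfold pvBrk
  have e1 : PySem.List.pyGetD xs (i : Int) 0 = xs[i]'hi := by
    rw [PySem.List.pyGetD_natCast, List.getD_eq_getElem?_getD, List.getElem?_eq_getElem hi]
    rfl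
  have e2 : PySem.List.pyGetD xs ((i : Int) - 1) 0 = xs[i - 1]'hj := by
    have : (i : Int) - 1 = ((i - 1 : Nat) : Int) := by omega
    rw [this, PySem.List.pyGetD_natCast, List.getD_eq_getElem?_getD,
      List.getElem?_eq_getElem hj]
    rfl
  rw [e1, e2]
  simp

-- loop invariant: A's loop on the suffix from index i, with current_group = xs[s:i],
-- yields the slices of B's remaining boundary list s :: breaks≥i ++ [n]
theorem pvGoA_eq_pairs (xs : List Int) (g : Int) :
    ∀ (d i s : Nat) (acc : List (List Int)), xs.length - i = d → s < i → i ≤ xs.length →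
      pvGoA g (xs.drop i) (PySem.List.slice xs (some (s : Int)) (some (i : Int))) acc =
        acc ++ pvPairs xs ((s : Int) :: (pvBrkFrom xs g (i : Int) ++ [(xs.length : Int)])) := by
  intro d
  induction d with
  | zero =>
      intro i s acc hd hs hi
      have hin : i = xs.length := by omega
      subst hin
      rw [List.drop_length, pvBrkFrom_nil]
      simp only [List.nil_append, pvGoA]
      rw [pvPairs_cons_cons]
      simp [pvPairs]
  | succ d ih =>
      intro i s acc hd hs hi
      have hilt : i < xs.length := by omega
      rw [List.drop_eq_getElem_cons hilt]
      have h1i : 1 ≤ i := by omega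
      have hj : i - 1 < xs.length := by omega
      have hgl := pvSlice_getLast! xs s i hs hi hj
      by_cases hbr : pvBrk xs g (i : Int)
      · -- break at i: flush current group xs[s:i], start new group [xs[i]] = xs[i:i+1]
        have hcond : ¬ (xs[i]'hilt - (PySem.List.slice xs (some (s:Int)) (some (i:Int))).getLast! ≤ g) := by
          rw [hgl]
          have := (pvBrk_iff xs g i h1i hilt hj).mp hbr
          omega
        rw [pvGoA, if_neg hcond]
        rw [← pvSlice_single xs i hilt]
        rw [ih (i + 1) i (acc ++ [PySem.List.slice xs (some (s:Int)) (some (i:Int))]) (by omega) (by omega) (by omega)]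
        rw [pvBrkFrom_cons xs g i hilt, if_pos hbr]
        rw [List.cons_append, pvPairs_cons_cons]
        simp
      · -- no break: extend the current group, xs[s:i] ++ [xs[i]] = xs[s:i+1]
        have hcond : xs[i]'hilt - (PySem.List.slice xs (some (s:Int)) (some (i:Int))).getLast! ≤ g := by
          rw [hgl]
          have := (pvBrk_iff xs g i h1i hilt hj).not.mp hbr
          omega
        rw [pvGoA, if_pos hcond]
        rw [pvSlice_snoc xs s i (by omega) hilt]
        rw [ih (i + 1) s acc (by omega) (by omega) (by omega)]
        rw [pvBrkFrom_cons xs g i hilt, if_neg hbr]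

-- ===== VERDICT (by name: the statement is the Claim_ definition above) =====
theorem group_outlier_columns_spec : Claim_equal_group_outlier_columns := by
  intro xs g _ hpre
  unfold Spec_group_outlier_columns group_outlier_columns group_outlier_columns_alt
  have hn : 0 < xs.length := List.length_pos_of_ne_nil hpre
  have htail : xs.tail = xs.drop 1 := by simp
  have hhead : [xs.head!] = PySem.List.slice xs (some ((0 : Nat) : Int)) (some ((1 : Nat) : Int)) := by
    rw [show ((1 : Nat) : Int) = (((0 : Nat) + 1 : Nat) : Int) from rfl,
      pvSlice_single xs 0 hn]
    cases xs with
    | nil => exact absurd rfl hpre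
    | cons x t => simp
  rw [htail, hhead,
    pvGoA_eq_pairs xs g (xs.length - 1) 1 0 [] (by omega) (by omega) (by omega)]
  simp only [List.nil_append, Nat.cast_zero, Nat.cast_one]
  rfl
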